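-- pv_equiv track=rewrite | github.com/breezy-team/breezy | breezy/commands.py | _get_help_parts
-- ===== SOURCE A (Python) =====
-- def _get_help_parts(text):
--     """Split help text into a summary and named sections.
--
--     :return: (summary,sections,order) where summary is the top line and
--         sections is a dictionary of the rest indexed by section name.
--         order is the order the section appear in the text.
--         A section starts with a heading line of the form ":xxx:".
--         Indented text on following lines is the section value.
--         All text found outside a named section is assigned to the
--         default section which is given the key of None.
--     """
--
--     def save_section(sections, order, label, section):
--         if len(section) > 0:
--             if label in sections:
--                 sections[label] += "\n" + section
--             else:
--                 order.append(label)
--                 sections[label] = section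
--
--     lines = text.rstrip().splitlines()
--     summary = lines.pop(0)
--     sections = {}
--     order = []
--     label, section = None, ""
--     for line in lines:
--         if line.startswith(":") and line.endswith(":") and len(line) > 2:
--             save_section(sections, order, label, section)
--             label, section = line[1:-1], ""
--         elif label is not None and len(line) > 1 and not line[0].isspace():
--             save_section(sections, order, label, section)
--             label, section = None, line
--         else:
--             if len(section) > 0:
--                 section += "\n" + line
--             else:
--                 section = line
--     save_section(sections, order, label, section)
--     return summary, sections, order
-- ===== SOURCE B (Python) =====
-- def _get_help_parts(text):
--     """Split help text into a summary and named sections.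
--
--     Two-stage rewrite: stage 1 cuts the body lines into a flat list of
--     (label, text) chunks; stage 2 folds the chunks into sections/order,
--     merging duplicate labels. Same return value as the one-pass version.
--     """
--     lines = text.rstrip().splitlines()
--     summary = lines.pop(0)
--
--     # Stage 1: flat chunk list.
--     chunks = []
--     label, buf = None, ""
--     for line in lines:
--         if line.startswith(":") and line.endswith(":") and len(line) > 2:
--             if buf:
--                 chunks.append((label, buf))
--             label, buf = line[1:-1], ""
--         elif label is not None and len(line) > 1 and not line[0].isspace():
--             if buf:
--                 chunks.append((label, buf))
--             label, buf = None, line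
--         else:
--             buf = buf + "\n" + line if buf else line
--     if buf:
--         chunks.append((label, buf))
--
--     # Stage 2: fold chunks into the ordered section dictionary.
--     sections = {}
--     order = []
--     for lab, txt in chunks:
--         if lab in sections:
--             sections[lab] = sections[lab] + "\n" + txt
--         else:
--             order.append(lab)
--             sections[lab] = txt
--     return summary, sections, order
-- ===== Notes on version B (the rewrite author's own statement) =====
-- stated objective: alternative
-- what changed: A interleaves parsing and dictionary updates in one loop with a mutating save_section helper; B is two separate stages: first cut the body lines into a flat list of (label, text) chunks, then fold that chunk list into the ordered sections dictionary.
import Mathlib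
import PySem

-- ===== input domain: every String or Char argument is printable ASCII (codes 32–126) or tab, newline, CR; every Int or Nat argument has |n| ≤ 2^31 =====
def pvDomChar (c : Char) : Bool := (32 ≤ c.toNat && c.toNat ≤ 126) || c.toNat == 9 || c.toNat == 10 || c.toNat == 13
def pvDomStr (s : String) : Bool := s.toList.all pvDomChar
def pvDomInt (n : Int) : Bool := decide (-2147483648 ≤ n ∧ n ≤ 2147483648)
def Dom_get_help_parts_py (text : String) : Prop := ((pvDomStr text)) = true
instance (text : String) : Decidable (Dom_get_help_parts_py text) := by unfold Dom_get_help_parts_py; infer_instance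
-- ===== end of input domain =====

-- B rewrites A's single interleaved loop as two stages (a flat chunk list, then a fold into the
-- ordered dictionary); same return value (objective: alternative decomposition).

-- ===== PORT A =====
-- shared branch conditions (both Pythons test literally the same expressions on each line)
def pvIsHeading (line : String) : Bool :=
  PySem.Str.startswith line ":" && PySem.Str.endswith line ":" && decide (PySem.Str.len line > 2)

def pvIsUnindented (label : Option String) (line : String) : Bool :=
  label.isSome && decide (PySem.Str.len line > 1)
    && !((PySem.Str.pyGet? line 0).elim false PySem.Chars.isspace)

-- save_section; `sections[label] += "\n" + section` reads the existing entry (present, since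
-- guarded by `label in sections`), modelled by getD with an unused default.
def pySaveSection (sections : PySem.Dict (Option String) String) (order : List (Option String))
    (label : Option String) (sec : String) :
    PySem.Dict (Option String) String × List (Option String) :=
  if PySem.Str.len sec > 0 then
    if sections.contains label then
      (sections.insert label (sections.getD label "" ++ "\n" ++ sec), order)
    else
      (sections.insert label sec, order ++ [label])
  else (sections, order)

-- the body of A's `for line in lines` (state: sections, order, label, section)
def pyStepA (st : PySem.Dict (Option String) String × List (Option String) × Option String × String)
    (line : String) :
    PySem.Dict (Option String) String × List (Option String) × Option String × String :=
  if pvIsHeading line then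
    let p := pySaveSection st.1 st.2.1 st.2.2.1 st.2.2.2
    (p.1, p.2, some (PySem.Str.slice line (some 1) (some (-1))), "")
  else if pvIsUnindented st.2.2.1 line then
    let p := pySaveSection st.1 st.2.1 st.2.2.1 st.2.2.2
    (p.1, p.2, none, line)
  else
    (st.1, st.2.1, st.2.2.1,
     if PySem.Str.len st.2.2.2 > 0 then st.2.2.2 ++ "\n" ++ line else line)

def get_help_parts_py (text : String) :
    String × (List (Option String × String)) × List (Option String) :=
  match PySem.Str.splitlines (PySem.Str.rstrip text) with
  | [] => ("", [], [])  -- Python raises IndexError at lines.pop(0); outside Pre_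
  | summary :: lines =>
    let st := lines.foldl pyStepA ((PySem.Dict.empty : PySem.Dict (Option String) String), [], none, "")
    let p := pySaveSection st.1 st.2.1 st.2.2.1 st.2.2.2
    (summary, p.1.items, p.2)

-- ===== PORT B =====
-- stage 1: cut the body lines into a flat list of (label, text) chunks (state: chunks, label, buf)
def altStep (st : List (Option String × String) × Option String × String) (line : String) :
    List (Option String × String) × Option String × String :=
  if pvIsHeading line then
    ((if PySem.Str.len st.2.2 > 0 then st.1 ++ [(st.2.1, st.2.2)] else st.1),
     some (PySem.Str.slice line (some 1) (some (-1))), "")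
  else if pvIsUnindented st.2.1 line then
    ((if PySem.Str.len st.2.2 > 0 then st.1 ++ [(st.2.1, st.2.2)] else st.1), none, line)
  else
    (st.1, st.2.1, if PySem.Str.len st.2.2 > 0 then st.2.2 ++ "\n" ++ line else line)

def altChunks (lines : List String) : List (Option String × String) :=
  let r := lines.foldl altStep ([], none, "")
  if PySem.Str.len r.2.2 > 0 then r.1 ++ [(r.2.1, r.2.2)] else r.1

-- stage 2: fold one (nonempty) chunk into sections/order
def altFold (acc : PySem.Dict (Option String) String × List (Option String))
    (chunk : Option String × String) :
    PySem.Dict (Option String) String × List (Option String) :=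
  if acc.1.contains chunk.1 then
    (acc.1.insert chunk.1 (acc.1.getD chunk.1 "" ++ "\n" ++ chunk.2), acc.2)
  else
    (acc.1.insert chunk.1 chunk.2, acc.2 ++ [chunk.1])

def get_help_parts_py_alt (text : String) :
    String × (List (Option String × String)) × List (Option String) :=
  match PySem.Str.splitlines (PySem.Str.rstrip text) with
  | [] => ("", [], [])  -- Python raises IndexError at lines.pop(0); outside Pre_
  | summary :: lines =>
    let p := (altChunks lines).foldl altFold
      ((PySem.Dict.empty : PySem.Dict (Option String) String), [])
    (summary, p.1.items, p.2)

-- ===== PRECONDITION & SPEC =====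
-- Pre_ excludes exactly the inputs whose stripped text has no lines (empty/whitespace text),
-- where both Pythons raise IndexError at lines.pop(0).
def Pre_get_help_parts_py (text : String) : Prop :=
  PySem.Str.splitlines (PySem.Str.rstrip text) ≠ []
instance (text : String) : Decidable (Pre_get_help_parts_py text) := by
  unfold Pre_get_help_parts_py; infer_instance

def pvWitness_get_help_parts_py : String :=
  "summary\n:usage:\n  run it\nplain text\n:usage:\n  again"

def Spec_get_help_parts_py (text : String)
    (out : String × (List (Option String × String)) × List (Option String)) : Prop :=
  out = get_help_parts_py_alt text
instance (text : String) (out : String × (List (Option String × String)) × List (Option String)) :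
    Decidable (Spec_get_help_parts_py text out) := by unfold Spec_get_help_parts_py; infer_instance

-- ===== CLAIM (what is proved, stated in full; the proofs are below) =====
def Claim_equal_get_help_parts_py : Prop :=
  ∀ (text : String), Dom_get_help_parts_py text → Pre_get_help_parts_py text →
    Spec_get_help_parts_py text (get_help_parts_py text)

-- ===== LEMMAS AND PROOFS =====

-- saving one buffer equals folding its (skipped-if-empty) chunk
lemma pySaveSection_eq_foldl (s : PySem.Dict (Option String) String)
    (o : List (Option String)) (lab : Option String) (buf : String) :
    pySaveSection s o lab buf
      = (if PySem.Str.len buf > 0 then [(lab, buf)] else []).foldl altFold (s, o) := by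
  unfold pySaveSection altFold
  split <;> simp_all

-- stage 1's chunk accumulator only appends
lemma altStep_acc (lines : List String) :
    ∀ (cs : List (Option String × String)) (lab : Option String) (buf : String),
    lines.foldl altStep (cs, lab, buf)
      = (cs ++ (lines.foldl altStep ([], lab, buf)).1,
         (lines.foldl altStep ([], lab, buf)).2.1,
         (lines.foldl altStep ([], lab, buf)).2.2) := by
  induction lines with
  | nil => intro cs lab buf; simp
  | cons line rest ih =>
    intro cs lab buf
    simp only [List.foldl_cons, altStep]
    by_cases h1 : pvIsHeading line = true
    · rw [if_pos h1, if_pos h1]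
      by_cases hb : PySem.Str.len buf > 0
      · rw [if_pos hb, if_pos hb, ih (cs ++ [(lab, buf)]), ih ([] ++ [(lab, buf)])]
        simp
      · rw [if_neg hb, if_neg hb, ih cs, ih []]
    · rw [if_neg h1, if_neg h1]
      by_cases h2 : pvIsUnindented lab line = true
      · rw [if_pos h2, if_pos h2]
        by_cases hb : PySem.Str.len buf > 0
        · rw [if_pos hb, if_pos hb, ih (cs ++ [(lab, buf)]), ih ([] ++ [(lab, buf)])]
          simp
        · rw [if_neg hb, if_neg hb, ih cs, ih []]
      · rw [if_neg h2, if_neg h2]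
        exact ih cs lab _

-- main invariant: A's interleaved loop + trailing save = stage 2 folded over stage 1's chunks
lemma loop_eq (lines : List String) :
    ∀ (s : PySem.Dict (Option String) String) (o : List (Option String))
      (lab : Option String) (buf : String),
    pySaveSection (lines.foldl pyStepA (s, o, lab, buf)).1
        (lines.foldl pyStepA (s, o, lab, buf)).2.1
        (lines.foldl pyStepA (s, o, lab, buf)).2.2.1
        (lines.foldl pyStepA (s, o, lab, buf)).2.2.2
      = (if PySem.Str.len (lines.foldl altStep ([], lab, buf)).2.2 > 0 then
           (lines.foldl altStep ([], lab, buf)).1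
             ++ [((lines.foldl altStep ([], lab, buf)).2.1, (lines.foldl altStep ([], lab, buf)).2.2)]
         else (lines.foldl altStep ([], lab, buf)).1).foldl altFold (s, o) := by
  induction lines with
  | nil =>
    intro s o lab buf
    simpa using pySaveSection_eq_foldl s o lab buf
  | cons line rest ih =>
    intro s o lab buf
    simp only [List.foldl_cons, pyStepA, altStep]
    by_cases h1 : pvIsHeading line = true
    · rw [if_pos h1, if_pos h1]
      rw [ih, pySaveSection_eq_foldl s o lab buf]
      simp only [List.nil_append]
      rw [altStep_acc rest (if PySem.Str.len buf > 0 then [(lab, buf)] else []) _ _]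
      simp only [Prod.mk.eta]
      split_ifs <;> simp [List.foldl_append]
    · rw [if_neg h1, if_neg h1]
      by_cases h2 : pvIsUnindented lab line = true
      · rw [if_pos h2, if_pos h2]
        rw [ih, pySaveSection_eq_foldl s o lab buf]
        simp only [List.nil_append]
        rw [altStep_acc rest (if PySem.Str.len buf > 0 then [(lab, buf)] else []) _ _]
        simp only [Prod.mk.eta]
        split_ifs <;> simp [List.foldl_append]
      · rw [if_neg h2, if_neg h2]
        exact ih s o lab _

-- ===== VERDICT (by name: the statement is the Claim_ definition above) =====
theorem get_help_parts_py_spec : Claim_equal_get_help_parts_py := by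
  intro text _ _
  unfold Spec_get_help_parts_py get_help_parts_py get_help_parts_py_alt altChunks
  cases h : PySem.Str.splitlines (PySem.Str.rstrip text) with
  | nil => rfl
  | cons summary lines =>
    simp only
    rw [loop_eq lines PySem.Dict.empty [] none ""]
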